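-- pv_equiv track=rewrite | github.com/Kartikay26/cp-sublime-conf | python.py | check
-- ===== SOURCE A (Python) =====
-- def check(s):
-- 	n = len(s)
-- 	palin = []
-- 	for i in range(n+1):
-- 		for j in range(i-1):
-- 			if s[j:i] == s[j:i][::-1]:
-- 				palin.append((j,i))
-- 	def checkp(x):
-- 		for i, j in palin:
-- 			if i <= x < j:
-- 				return True
-- 		return False
-- 	return all(checkp(i) for i in range(n))
-- ===== SOURCE B (Python) =====
-- def check(s):
--     n = len(s)
--
--     def expand(l, r):
--         # grow the palindrome [l, r) while the flanking characters match
--         while l > 0 and r < n and s[l - 1] == s[r]: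
--             l -= 1
--             r += 1
--         return l, r
--
--     covered = [False] * n
--     for c in range(n + 1):
--         for lo, hi in (expand(c, c), expand(c, c + 1)):
--             if hi - lo >= 2:
--                 for x in range(lo, hi):
--                     covered[x] = True
--     return all(covered)
-- ===== Notes on version B (the rewrite author's own statement) =====
-- stated objective: faster
-- what changed: Instead of enumerating every substring and testing each for palindromicity, B expands each of the O(n) centers once to its maximal palindrome (palindromes at one center are nested) and marks the covered interval in a boolean array, then checks all positions are marked.
import Mathlib
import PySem

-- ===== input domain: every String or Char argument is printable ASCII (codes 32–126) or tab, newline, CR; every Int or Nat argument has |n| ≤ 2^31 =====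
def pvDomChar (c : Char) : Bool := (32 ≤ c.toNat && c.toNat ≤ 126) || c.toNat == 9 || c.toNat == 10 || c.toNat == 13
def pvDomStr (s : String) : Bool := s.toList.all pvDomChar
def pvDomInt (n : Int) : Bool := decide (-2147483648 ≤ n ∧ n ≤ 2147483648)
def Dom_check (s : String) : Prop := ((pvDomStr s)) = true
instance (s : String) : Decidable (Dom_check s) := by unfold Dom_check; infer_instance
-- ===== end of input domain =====

-- B replaces A's all-substrings palindrome scan by expand-around-center interval marking (measured asymptotically faster).

-- ===== PORT A =====
def check (s : String) : Bool :=
  let cs := s.toList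
  let n : Int := cs.length
  let palin : List (Int × Int) :=
    (PySem.List.pyRange 0 (n + 1) 1).foldl (fun acc i =>
      (PySem.List.pyRange 0 (i - 1) 1).foldl (fun acc j =>
        if PySem.List.slice cs (some j) (some i)
            = (PySem.List.slice cs (some j) (some i)).reverse
        then acc ++ [(j, i)] else acc) acc) []
  -- checkp(x): linear scan of palin with early return True = List.any
  (PySem.List.pyRange 0 n 1).all (fun x =>
    palin.any (fun p => decide (p.1 ≤ x) && decide (x < p.2)))

-- ===== PORT B =====
-- Source B's expand(l, r): grow [l, r) while the flanking characters match ('l > 0' is the pattern match)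
def expandAlt (cs : List Char) : Nat → Nat → Nat × Nat
  | 0, r => (0, r)
  | l + 1, r =>
    if r < cs.length ∧ cs[l]? = cs[r]? then expandAlt cs l (r + 1)
    else (l + 1, r)

def check_alt (s : String) : Bool :=
  let cs := s.toList
  let n := cs.length
  let covered : List Bool :=
    (List.range (n + 1)).foldl (fun cov c =>
      [expandAlt cs c c, expandAlt cs c (c + 1)].foldl (fun cov p =>
        if 2 ≤ p.2 - p.1 then
          (List.range' p.1 (p.2 - p.1)).foldl (fun cov x => cov.set x true) cov
        else cov) cov)
      (List.replicate n false)
  covered.all (fun b => b)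

-- ===== PRECONDITION & SPEC =====
def Spec_check (s : String) (out : Bool) : Prop := out = check_alt s
instance (s : String) (out : Bool) : Decidable (Spec_check s out) := by unfold Spec_check; infer_instance

-- ===== CLAIM (what is proved, stated in full; the proofs are below) =====
def Claim_equal_check : Prop := ∀ (s : String), Dom_check s → Spec_check s (check s)

-- ===== LEMMAS AND PROOFS =====

-- pointwise palindromicity of cs[j:i): mirror pairs (a, b) around the center are equal
def Pal (cs : List Char) (j i : Nat) : Prop :=
  ∀ a b : Nat, j ≤ a → a < i → a + b + 1 = j + i → cs[a]? = cs[b]?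

-- index x is covered by some palindromic substring of length ≥ 2
def Cov (cs : List Char) (x : Nat) : Prop :=
  ∃ j i : Nat, j + 2 ≤ i ∧ i ≤ cs.length ∧ Pal cs j i ∧ j ≤ x ∧ x < i

-- B's marking condition at center c: one of the two seeds expands to cover x with length ≥ 2
def Qc (cs : List Char) (c x : Nat) : Prop :=
  (2 ≤ (expandAlt cs c c).2 - (expandAlt cs c c).1 ∧
    (expandAlt cs c c).1 ≤ x ∧ x < (expandAlt cs c c).2) ∨
  (2 ≤ (expandAlt cs c (c + 1)).2 - (expandAlt cs c (c + 1)).1 ∧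
    (expandAlt cs c (c + 1)).1 ≤ x ∧ x < (expandAlt cs c (c + 1)).2)

theorem pal_extend {cs : List Char} {l r : Nat} (hl : 0 < l)
    (h : Pal cs l r) (he : cs[l - 1]? = cs[r]?) : Pal cs (l - 1) (r + 1) := by
  intro a b ha hai hab
  rcases Nat.lt_or_ge a l with h1 | h2
  · have haeq : a = l - 1 := by omega
    have hbeq : b = r := by omega
    subst haeq; subst hbeq; exact he
  · rcases Nat.lt_or_ge a r with h3 | h4
    · exact h a b h2 h3 (by omega)
    · have haeq : a = r := by omega
      have hbeq : b = l - 1 := by omega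
      subst haeq; subst hbeq; exact he.symm

theorem pal_seed_even (cs : List Char) (c : Nat) : Pal cs c c := by
  intro a b ha hai hab; exact absurd hai (by omega)

theorem pal_seed_odd (cs : List Char) (c : Nat) : Pal cs c (c + 1) := by
  intro a b ha hai hab
  have h1 : a = c := by omega
  have h2 : b = c := by omega
  subst h1; subst h2; rfl

theorem expand_extends (cs : List Char) :
    ∀ l r, (expandAlt cs l r).1 ≤ l ∧ r ≤ (expandAlt cs l r).2 := by
  intro l
  induction l with
  | zero => intro r; simp [expandAlt]
  | succ l ih =>
    intro r
    simp only [expandAlt]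
    split
    · have := ih (r + 1); omega
    · simp

theorem expand_pal (cs : List Char) :
    ∀ l r, Pal cs l r → Pal cs (expandAlt cs l r).1 (expandAlt cs l r).2 := by
  intro l
  induction l with
  | zero => intro r h; exact h
  | succ l ih =>
    intro r h
    simp only [expandAlt]
    split
    · rename_i hc
      exact ih (r + 1) (pal_extend (Nat.succ_pos l) h hc.2)
    · exact h

theorem expand_le (cs : List Char) :
    ∀ l r, (expandAlt cs l r).2 ≤ cs.length ∨ expandAlt cs l r = (l, r) := by
  intro l
  induction l with
  | zero => intro r; right; rfl
  | succ l ih =>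
    intro r
    simp only [expandAlt]
    split
    · rename_i hc
      rcases ih (r + 1) with h | h
      · exact Or.inl h
      · left; rw [h]; exact hc.1
    · right; rfl

theorem expand_reach (cs : List Char) (j i : Nat) (hp : Pal cs j i) (hin : i ≤ cs.length) :
    ∀ l r, j ≤ l → l ≤ r → l + r = j + i →
      (expandAlt cs l r).1 ≤ j ∧ i ≤ (expandAlt cs l r).2 := by
  intro l
  induction l with
  | zero =>
    intro r hjl hlr hsum
    have h := expand_extends cs 0 r
    omega
  | succ l ih =>
    intro r hjl hlr hsum
    by_cases hl : j = l + 1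
    · have h := expand_extends cs (l + 1) r
      omega
    · have hjl' : j ≤ l := by omega
      have hli : l < i := by omega
      have ha : cs[l]? = cs[r]? := hp l r hjl' hli (by omega)
      have hrlen : r < cs.length := by omega
      simp only [expandAlt]
      rw [if_pos ⟨hrlen, ha⟩]
      exact ih (r + 1) (by omega) (by omega) (by omega)

theorem slice_pal_iff (cs : List Char) (j i : Nat) (hji : j ≤ i) (hin : i ≤ cs.length) :
    ((cs.drop j).take (i - j) = ((cs.drop j).take (i - j)).reverse) ↔ Pal cs j i := by
  have hlen : ((cs.drop j).take (i - j)).length = i - j := by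
    simp [List.length_take, List.length_drop]; omega
  have hget : ∀ k, k < i - j → ((cs.drop j).take (i - j))[k]? = cs[j + k]? := by
    intro k hk
    rw [List.getElem?_take_of_lt hk, List.getElem?_drop]
  constructor
  · intro h a b ha hai hab
    have hk : a - j < i - j := by omega
    have e1 : ((cs.drop j).take (i - j))[a - j]? = cs[a]? := by
      rw [hget _ hk]; congr 1; omega
    have e2 : ((cs.drop j).take (i - j))[i - j - 1 - (a - j)]? = cs[b]? := by
      rw [hget _ (by omega)]; congr 1; omega
    have e3 : ((cs.drop j).take (i - j))[a - j]? =
        (((cs.drop j).take (i - j)).reverse)[a - j]? := by rw [← h]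
    rw [List.getElem?_reverse (by rw [hlen]; omega), hlen] at e3
    rw [← e1, e3, e2]
  · intro h
    apply List.ext_getElem?
    intro k
    by_cases hk : k < i - j
    · rw [List.getElem?_reverse (by rw [hlen]; omega), hlen]
      rw [hget _ hk, hget _ (by omega)]
      exact h (j + k) (j + (i - j - 1 - k)) (by omega) (by omega) (by omega)
    · rw [List.getElem?_eq_none_iff.mpr (by rw [hlen]; omega),
        List.getElem?_eq_none_iff.mpr (by rw [List.length_reverse, hlen]; omega)]

-- ===== A-side characterization =====

theorem check_iff (s : String) :
    check s = true ↔ ∀ x : Nat, x < s.toList.length → Cov s.toList x := by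
  unfold check
  simp only [PySem.List.foldl_append_ite, PySem.List.foldl_append_eq_flatMap, List.nil_append,
    List.all_eq_true, List.any_eq_true, List.mem_flatMap, List.mem_map, List.mem_filter,
    PySem.List.mem_pyRange_one, Bool.and_eq_true, decide_eq_true_eq]
  constructor
  · intro H x hx
    obtain ⟨p, ⟨i, hi, j, ⟨hj, hslice⟩, hpj⟩, hp1, hp2⟩ :=
      H (x : Int) ⟨by omega, by omega⟩
    subst hpj
    have hp1' : j ≤ (x : Int) := hp1
    have hp2' : (x : Int) < i := hp2
    have h0j : (0 : Int) ≤ j := hj.1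
    have h0i : (0 : Int) ≤ i := hi.1
    rw [PySem.List.slice_toNat s.toList h0j h0i] at hslice
    refine ⟨j.toNat, i.toNat, by omega, by omega, ?_, by omega, by omega⟩
    exact (slice_pal_iff _ _ _ (by omega) (by omega)).mp hslice
  · intro H x hx
    obtain ⟨j, i, h2, hin, hp, hjx, hxi⟩ := H x.toNat (by omega)
    refine ⟨((j : Int), (i : Int)),
      ⟨(i : Int), ⟨by omega, by omega⟩, (j : Int), ⟨⟨by omega, by omega⟩, ?_⟩, rfl⟩, ?_, ?_⟩
    · rw [PySem.List.slice_natCast]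
      exact (slice_pal_iff _ _ _ (by omega) hin).mpr hp
    · show (j : Int) ≤ x
      omega
    · show x < (i : Int)
      omega

-- ===== B-side characterization =====

theorem mark_get_true (len : Nat) : ∀ (lo : Nat) (cov : List Bool) (x : Nat),
    ((List.range' lo len).foldl (fun cov x => cov.set x true) cov)[x]? = some true ↔
      ((lo ≤ x ∧ x < lo + len ∧ x < cov.length) ∨ cov[x]? = some true) := by
  induction len with
  | zero =>
    intro lo cov x
    constructor
    · intro h; exact Or.inr h
    · rintro (⟨h1, h2, _⟩ | h)
      · omega
      · exact h
  | succ m ih =>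
    intro lo cov x
    rw [List.range'_succ]
    simp only [List.foldl_cons]
    rw [ih (lo + 1) (cov.set lo true) x]
    constructor
    · rintro (⟨h1, h2, h3⟩ | h)
      · rw [List.length_set] at h3
        exact Or.inl ⟨by omega, by omega, h3⟩
      · by_cases hx : x = lo
        · subst hx
          rw [List.getElem?_set_self'] at h
          rcases hcov : cov[x]? with _ | b
          · rw [hcov] at h; simp at h
          · exact Or.inl ⟨le_rfl, by omega, (List.getElem?_eq_some_iff.mp hcov).1⟩
        · rw [List.getElem?_set_ne (by omega)] at h
          exact Or.inr h
    · rintro (⟨h1, h2, h3⟩ | h)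
      · by_cases hx : x = lo
        · subst hx
          right
          rw [List.getElem?_set_self']
          rcases hcov : cov[x]? with _ | b
          · have := List.getElem?_eq_none_iff.mp hcov; omega
          · rfl
        · exact Or.inl ⟨by omega, by omega, by rw [List.length_set]; exact h3⟩
      · by_cases hx : x = lo
        · subst hx
          right
          rw [List.getElem?_set_self', h]
          rfl
        · right
          rw [List.getElem?_set_ne (by omega)]
          exact h

theorem mark_length : ∀ (l : List Nat) (cov : List Bool),
    (l.foldl (fun cov x => cov.set x true) cov).length = cov.length := by
  intro l
  induction l with
  | nil => intro cov; rfl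
  | cons a t ih => intro cov; rw [List.foldl_cons, ih, List.length_set]

theorem step_get_true (p : Nat × Nat) (cov : List Bool) (x : Nat) :
    ((if 2 ≤ p.2 - p.1 then
        (List.range' p.1 (p.2 - p.1)).foldl (fun cov x => cov.set x true) cov
      else cov))[x]? = some true ↔
      ((2 ≤ p.2 - p.1 ∧ p.1 ≤ x ∧ x < p.2) ∧ x < cov.length ∨ cov[x]? = some true) := by
  by_cases hc : 2 ≤ p.2 - p.1
  · rw [if_pos hc, mark_get_true]
    constructor
    · rintro (⟨h1, h2, h3⟩ | h)
      · exact Or.inl ⟨⟨hc, h1, by omega⟩, h3⟩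
      · exact Or.inr h
    · rintro (⟨⟨_, h1, h2⟩, h3⟩ | h)
      · exact Or.inl ⟨h1, by omega, h3⟩
      · exact Or.inr h
  · rw [if_neg hc]
    constructor
    · intro h; exact Or.inr h
    · rintro (⟨⟨h0, _⟩, _⟩ | h)
      · exact absurd h0 hc
      · exact h

theorem step_length (p : Nat × Nat) (cov : List Bool) :
    ((if 2 ≤ p.2 - p.1 then
        (List.range' p.1 (p.2 - p.1)).foldl (fun cov x => cov.set x true) cov
      else cov)).length = cov.length := by
  split
  · exact mark_length _ _
  · rfl

theorem gen_len (f : List Bool → Nat → List Bool)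
    (hlen : ∀ cov c, (f cov c).length = cov.length) :
    ∀ (l : List Nat) (cov : List Bool), (l.foldl f cov).length = cov.length := by
  intro l
  induction l with
  | nil => intro cov; rfl
  | cons a t ih => intro cov; rw [List.foldl_cons, ih, hlen]

theorem gen_get (f : List Bool → Nat → List Bool) (P : Nat → Nat → Prop)
    (hlen : ∀ cov c, (f cov c).length = cov.length)
    (hstep : ∀ cov c x, (f cov c)[x]? = some true ↔
      ((P c x ∧ x < cov.length) ∨ cov[x]? = some true)) :
    ∀ (m : Nat) (cov : List Bool) (x : Nat),
      ((List.range m).foldl f cov)[x]? = some true ↔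
        ((∃ c, c < m ∧ P c x) ∧ x < cov.length ∨ cov[x]? = some true) := by
  intro m
  induction m with
  | zero =>
    intro cov x
    constructor
    · intro h; exact Or.inr h
    · rintro (⟨⟨c, hc, _⟩, _⟩ | h)
      · omega
      · exact h
  | succ m ih =>
    intro cov x
    rw [List.range_succ, List.foldl_append, List.foldl_cons, List.foldl_nil]
    rw [hstep, gen_len f hlen, ih]
    constructor
    · rintro (⟨hq, hx⟩ | ⟨⟨c, hc, hq⟩, hx⟩ | hcov)
      · exact Or.inl ⟨⟨m, by omega, hq⟩, hx⟩
      · exact Or.inl ⟨⟨c, by omega, hq⟩, hx⟩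
      · exact Or.inr hcov
    · rintro (⟨⟨c, hc, hq⟩, hx⟩ | hcov)
      · by_cases hcm : c = m
        · subst hcm; exact Or.inl ⟨hq, hx⟩
        · exact Or.inr (Or.inl ⟨⟨c, by omega, hq⟩, hx⟩)
      · exact Or.inr (Or.inr hcov)

theorem body_length (cs : List Char) : ∀ (cov : List Bool) (c : Nat),
    (([expandAlt cs c c, expandAlt cs c (c + 1)].foldl (fun cov p =>
        if 2 ≤ p.2 - p.1 then
          (List.range' p.1 (p.2 - p.1)).foldl (fun cov x => cov.set x true) cov
        else cov) cov)).length = cov.length := by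
  intro cov c
  simp only [List.foldl_cons, List.foldl_nil]
  rw [step_length, step_length]

theorem body_get (cs : List Char) : ∀ (cov : List Bool) (c x : Nat),
    (([expandAlt cs c c, expandAlt cs c (c + 1)].foldl (fun cov p =>
        if 2 ≤ p.2 - p.1 then
          (List.range' p.1 (p.2 - p.1)).foldl (fun cov x => cov.set x true) cov
        else cov) cov))[x]? = some true ↔
      ((Qc cs c x ∧ x < cov.length) ∨ cov[x]? = some true) := by
  intro cov c x
  simp only [List.foldl_cons, List.foldl_nil]
  rw [step_get_true, step_get_true, step_length]
  unfold Qc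
  tauto

theorem Q_iff_cov (cs : List Char) (x : Nat) :
    (∃ c, c < cs.length + 1 ∧ Qc cs c x) ↔ Cov cs x := by
  constructor
  · rintro ⟨c, hc, hQ⟩
    rcases hQ with ⟨h2, hl, hr⟩ | ⟨h2, hl, hr⟩
    · have hpal := expand_pal cs c c (pal_seed_even cs c)
      rcases expand_le cs c c with hle | heq
      · exact ⟨(expandAlt cs c c).1, (expandAlt cs c c).2, by omega, hle, hpal, hl, hr⟩
      · rw [heq] at h2
        have h2' : 2 ≤ c - c := h2
        omega
    · have hpal := expand_pal cs c (c + 1) (pal_seed_odd cs c)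
      rcases expand_le cs c (c + 1) with hle | heq
      · exact ⟨(expandAlt cs c (c + 1)).1, (expandAlt cs c (c + 1)).2, by omega, hle, hpal, hl, hr⟩
      · rw [heq] at h2
        have h2' : 2 ≤ c + 1 - c := h2
        omega
  · rintro ⟨j, i, h2, hin, hp, hjx, hxi⟩
    by_cases hpar : (j + i) % 2 = 0
    · refine ⟨(j + i) / 2, by omega, Or.inl ?_⟩
      have hre := expand_reach cs j i hp hin ((j + i) / 2) ((j + i) / 2)
        (by omega) le_rfl (by omega)
      exact ⟨by omega, by omega, by omega⟩
    · refine ⟨(j + i) / 2, by omega, Or.inr ?_⟩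
      have hre := expand_reach cs j i hp hin ((j + i) / 2) ((j + i) / 2 + 1)
        (by omega) (by omega) (by omega)
      exact ⟨by omega, by omega, by omega⟩

theorem all_get : ∀ (l : List Bool),
    (l.all (fun b => b) = true) ↔ ∀ x : Nat, x < l.length → l[x]? = some true := by
  intro l
  rw [List.all_eq_true]
  constructor
  · intro H x hx
    exact List.getElem?_eq_some_iff.mpr ⟨hx, H _ (List.getElem_mem hx)⟩
  · intro H b hb
    obtain ⟨i, hi, rfl⟩ := List.mem_iff_getElem.mp hb
    obtain ⟨h', h''⟩ := List.getElem?_eq_some_iff.mp (H i hi)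
    exact h''

theorem check_alt_iff (s : String) :
    check_alt s = true ↔ ∀ x : Nat, x < s.toList.length → Cov s.toList x := by
  have hrfl : check_alt s = ((List.range (s.toList.length + 1)).foldl (fun cov c =>
      [expandAlt s.toList c c, expandAlt s.toList c (c + 1)].foldl (fun cov p =>
        if 2 ≤ p.2 - p.1 then
          (List.range' p.1 (p.2 - p.1)).foldl (fun cov x => cov.set x true) cov
        else cov) cov) (List.replicate s.toList.length false)).all (fun b => b) := rfl
  have hclen := gen_len _ (body_length s.toList)
  have hcget := gen_get _ (Qc s.toList) (body_length s.toList) (body_get s.toList)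
  rw [hrfl, all_get]
  constructor
  · intro H x hx
    have hx' := H x (by rw [hclen, List.length_replicate]; exact hx)
    have h2 := (hcget (s.toList.length + 1) (List.replicate s.toList.length false) x).mp hx'
    rcases h2 with ⟨⟨c, hc, hq⟩, _⟩ | habs
    · exact (Q_iff_cov s.toList x).mp ⟨c, hc, hq⟩
    · rw [List.getElem?_replicate] at habs
      split at habs <;> simp_all
  · intro H x hx'
    rw [hclen, List.length_replicate] at hx'
    exact (hcget (s.toList.length + 1) (List.replicate s.toList.length false) x).mpr
      (Or.inl ⟨(Q_iff_cov s.toList x).mpr (H x hx'),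
        by rw [List.length_replicate]; exact hx'⟩)

-- ===== VERDICT (by name: the statement is the Claim_ definition above) =====
theorem check_spec : Claim_equal_check := by
  intro s _
  unfold Spec_check
  exact Bool.coe_iff_coe.mp ((check_iff s).trans (check_alt_iff s).symm)
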